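-- pv_equiv track=rewrite | github.com/tennisdraws78-alt/tennisdraws | scrapers/itf_entries.py | _parse_tournament_name
-- ===== SOURCE A (Python) =====
-- _CITY_LOOKUP: dict[str, str] = {}
--
-- _ITF_TIER_PREFIXES = ("W100", "W75", "W50", "W35", "W15", "M25", "M15")
--
-- def _title_case_city(name: str) -> str:
--     """Convert an UPPER CASE city name to Title Case, preserving state abbreviations.
--
--     "SAN DIEGO, CA" -> "San Diego, CA"
--     "VERO BEACH, FL" -> "Vero Beach, FL"
--     "MONASTIR" -> "Monastir"
--     "SHARM ELSHEIKH" -> "Sharm ElSheikh" (via config lookup)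
--     """
--     if not name:
--         return name
--
--     # Try exact lookup from config first
--     canonical = _CITY_LOOKUP.get(name.upper())
--     if canonical:
--         return canonical
--
--     # Split on comma to handle "CITY, STATE" patterns
--     parts = name.split(",")
--     if len(parts) == 2:
--         city = parts[0].strip()
--         state = parts[1].strip()
--         # If state part is 2-3 letters, it's a US state abbreviation — keep uppercase
--         if len(state) <= 3 and state.isalpha():
--             city_title = _CITY_LOOKUP.get(city.upper()) or city.title()
--             return f"{city_title}, {state.upper()}"
--         return f"{city.title()}, {state.title()}"
--
--     return name.title()
--
-- def _parse_tournament_name(text: str) -> tuple[str, str]: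
--     """Parse ITF tournament display name into (city, tier_prefix).
--
--     Input examples from the ITF calendar page:
--         "W100 SAN DIEGO, CA"  -> ("San Diego, CA", "W100")
--         "M25 MONASTIR"        -> ("Monastir", "M25")
--         "W75 PORTO"           -> ("Porto", "W75")
--         "W75 ANDRÉZIEUX-BOUTHÉON" -> ("Andrézieux-Bouthéon", "W75")
--
--     Returns:
--         (city, tier_prefix): city in Title Case, tier_prefix like "W100".
--         If no tier prefix found, returns (text_in_title_case, "").
--     """
--     text = text.strip()
--     tier_prefix = ""
--     city_part = text
--
--     for prefix in _ITF_TIER_PREFIXES: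
--         # Match prefix at start (case-insensitive)
--         if text.upper().startswith(prefix + " "):
--             tier_prefix = prefix.upper()
--             city_part = text[len(prefix):].strip()
--             break
--
--     city = _title_case_city(city_part)
--     return city, tier_prefix
-- ===== SOURCE B (Python) =====
-- _CITY_LOOKUP: dict[str, str] = {}
--
-- _ITF_TIER_PREFIXES = ("W100", "W75", "W50", "W35", "W15", "M25", "M15")
--
-- # tier numbers allowed per circuit letter (same data as _ITF_TIER_PREFIXES, keyed by letter)
-- _TIER_NUMBERS = {"W": ("100", "75", "50", "35", "15"), "M": ("25", "15")}
--
--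
-- def _title_case_city(name: str) -> str:
--     """Convert an UPPER CASE city name to Title Case, preserving state abbreviations."""
--     if not name:
--         return name
--
--     canonical = _CITY_LOOKUP.get(name.upper())
--     if canonical:
--         return canonical
--
--     parts = name.split(",")
--     if len(parts) == 2:
--         city = parts[0].strip()
--         state = parts[1].strip()
--         if len(state) <= 3 and state.isalpha():
--             city_title = _CITY_LOOKUP.get(city.upper()) or city.title()
--             return f"{city_title}, {state.upper()}"
--         return f"{city.title()}, {state.title()}"
--
--     return name.title()
--
--
-- def _match_tier(text: str) -> tuple[str, str]:
--     """Lex a leading tier token instead of trying each known prefix.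
--
--     A tier token is a circuit letter (W/M, any case) followed by a maximal
--     digit run and a space; it matches iff the digit run is one of the tier
--     numbers allowed for that letter.  Returns (tier_prefix, city_part).
--     """
--     if text:
--         letter = text[0].upper()
--         numbers = _TIER_NUMBERS.get(letter)
--         if numbers:
--             i = 1
--             while i < len(text) and text[i].isdigit():
--                 i += 1
--             if i < len(text) and text[i] == " " and text[1:i] in numbers:
--                 return letter + text[1:i], text[i + 1:].strip()
--     return "", text
--
--
-- def _parse_tournament_name(text: str) -> tuple[str, str]:
--     """Parse ITF tournament display name into (city, tier_prefix)."""
--     tier_prefix, city_part = _match_tier(text.strip())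
--     return _title_case_city(city_part), tier_prefix
-- ===== Notes on version B (the rewrite author's own statement) =====
-- stated objective: alternative
-- what changed: A tries each of the 7 known tier prefixes with a case-insensitive startswith on the whole uppercased text; B instead lexes the head of the string once - circuit letter W/M, a maximal digit run, then a space - and classifies the digit run against the numbers allowed for that letter, so the prefix tuple and the repeated whole-string uppercasing disappear.
import Mathlib
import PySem

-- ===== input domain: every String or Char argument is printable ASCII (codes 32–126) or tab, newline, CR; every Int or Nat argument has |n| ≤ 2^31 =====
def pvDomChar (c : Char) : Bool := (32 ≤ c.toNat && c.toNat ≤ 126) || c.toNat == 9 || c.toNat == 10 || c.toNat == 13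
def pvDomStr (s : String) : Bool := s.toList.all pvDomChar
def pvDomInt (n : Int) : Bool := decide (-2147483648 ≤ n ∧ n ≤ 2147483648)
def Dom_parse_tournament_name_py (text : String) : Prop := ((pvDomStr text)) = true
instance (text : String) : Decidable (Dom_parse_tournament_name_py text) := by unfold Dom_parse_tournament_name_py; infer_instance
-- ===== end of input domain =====

-- A tries each of the 7 tier prefixes with startswith on the whole uppercased text; B lexes the
-- head once (letter W/M, maximal digit run, space) and classifies the run per letter (objective: alternative).

-- ===== PORT A =====

-- shared helper: _CITY_LOOKUP is the empty module-level dict in both sources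
def pvCityLookup : PySem.Dict (List Char) (List Char) := ⟨[]⟩

-- hand port of Python str.title() (exact on ASCII): uppercase an alphabetic char after a
-- non-alphabetic position, lowercase the others, leave non-alphabetic chars unchanged
def pvTitleGo : List Char → Bool → List Char
  | [], _ => []
  | c :: cs, prev =>
      (if PySem.Chars.isalpha c then
        (if prev then PySem.Chars.lowerChar c else PySem.Chars.upperChar c)
       else c) :: pvTitleGo cs (PySem.Chars.isalpha c)

def pvTitle (s : List Char) : List Char := pvTitleGo s false

-- shared helper: _title_case_city (identical source in Source A and Source B)
def title_case_city_py (name : List Char) : List Char :=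
  if name = [] then name
  else
    -- canonical = _CITY_LOOKUP.get(name.upper()); 'if canonical:' = some non-empty string
    let canonical := (pvCityLookup.get? (PySem.Chars.upper name)).getD []
    if canonical ≠ [] then canonical
    else
      let parts := PySem.Chars.splitOn name [',']
      if parts.length = 2 then
        let city := PySem.Chars.strip (parts.getD 0 [])
        let state := PySem.Chars.strip (parts.getD 1 [])
        if state.length ≤ 3 ∧ PySem.Chars.strIsalpha state then
          -- city_title = _CITY_LOOKUP.get(city.upper()) or city.title()
          let lk := (pvCityLookup.get? (PySem.Chars.upper city)).getD []
          let cityTitle := if lk ≠ [] then lk else pvTitle city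
          cityTitle ++ [',', ' '] ++ PySem.Chars.upper state
        else
          pvTitle city ++ [',', ' '] ++ pvTitle state
      else pvTitle name

def pvTierPrefixes : List (List Char) :=
  [['W','1','0','0'], ['W','7','5'], ['W','5','0'], ['W','3','5'], ['W','1','5'],
   ['M','2','5'], ['M','1','5']]

-- A's for-loop with break over _ITF_TIER_PREFIXES
def pvLoopA (t : List Char) : List (List Char) → (List Char × List Char)
  | [] => ([], t)
  | p :: ps =>
      if PySem.Chars.startswith (PySem.Chars.upper t) (p ++ [' ']) then
        (PySem.Chars.upper p,
         PySem.Chars.strip (PySem.Chars.slice t (some (p.length : Int)) none))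
      else pvLoopA t ps

def parse_tournament_name_py (text : String) : String × String :=
  let t := PySem.Chars.strip text.toList
  let r := pvLoopA t pvTierPrefixes
  (String.ofList (title_case_city_py r.2), String.ofList r.1)

-- ===== PORT B =====

-- _TIER_NUMBERS = {"W": ("100","75","50","35","15"), "M": ("25","15")}
def pvTierNumbers : PySem.Dict (List Char) (List (List Char)) :=
  ⟨[(['W'], [['1','0','0'], ['7','5'], ['5','0'], ['3','5'], ['1','5']]),
    (['M'], [['2','5'], ['1','5']])]⟩

-- the 'while i < len(text) and text[i].isdigit(): i += 1' loop of _match_tier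
def pvScanDigits (t : List Char) (i : Nat) : Nat :=
  if h : i < t.length then
    if PySem.Chars.isdigit (t[i]'h) then pvScanDigits t (i + 1) else i
  else i
termination_by t.length - i

-- _match_tier(text) -> (tier_prefix, city_part)
def pvMatchTier (t : List Char) : List Char × List Char :=
  if t ≠ [] then
    -- letter = text[0].upper(): text[0] is defined because text is non-empty
    let letter : List Char := PySem.Chars.upper [t.headD ' ']
    match pvTierNumbers.get? letter with
    | some numbers =>
      -- 'if numbers:' — both stored tuples are non-empty, so truthiness = key present
      let i := pvScanDigits t 1
      if i < t.length ∧ t[i]? = some ' ' ∧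
          PySem.Chars.slice t (some 1) (some (i : Int)) ∈ numbers then
        (letter ++ PySem.Chars.slice t (some 1) (some (i : Int)),
         PySem.Chars.strip (PySem.Chars.slice t (some ((i : Int) + 1)) none))
      else ([], t)
    | none => ([], t)
  else ([], t)

def parse_tournament_name_py_alt (text : String) : String × String :=
  let r := pvMatchTier (PySem.Chars.strip text.toList)
  (String.ofList (title_case_city_py r.2), String.ofList r.1)

-- ===== PRECONDITION & SPEC =====
def Spec_parse_tournament_name_py (text : String) (out : String × String) : Prop := out = parse_tournament_name_py_alt text
instance (text : String) (out : String × String) : Decidable (Spec_parse_tournament_name_py text out) := by unfold Spec_parse_tournament_name_py; infer_instance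

-- ===== CLAIM (what is proved, stated in full; the proofs are below) =====
def Claim_equal_parse_tournament_name_py : Prop := ∀ (text : String), Dom_parse_tournament_name_py text → Spec_parse_tournament_name_py text (parse_tournament_name_py text)

-- ===== LEMMAS AND PROOFS =====

-- A's per-prefix test, as a proposition on t
def pvMatchP (t p : List Char) : Prop :=
  PySem.Chars.upper (t.take p.length) = p ∧ t[p.length]? = some ' '

-- upperChar maps only the space to a space
lemma pvUpperChar_eq_space_iff (c : Char) : PySem.Chars.upperChar c = ' ' ↔ c = ' ' := by
  unfold PySem.Chars.upperChar
  split
  · rename_i hl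
    simp only [PySem.Chars.islower, Bool.and_eq_true, decide_eq_true_eq] at hl
    have h97 : 97 ≤ c.toNat := hl.1
    have h122 : c.toNat ≤ 122 := hl.2
    have hv : (Char.ofNat (c.toNat - 32)).toNat = c.toNat - 32 := by
      rw [Char.toNat_ofNat, if_pos]
      exact Or.inl (by omega)
    constructor
    · intro h
      have h2 := congrArg Char.toNat h
      rw [hv] at h2
      have : (' ' : Char).toNat = 32 := rfl
      omega
    · intro h
      subst h
      simp at h97
  · exact Iff.rfl

-- upperChar can only produce a digit from that digit itself
lemma pvUpperChar_eq_digit (c d : Char) (hd : PySem.Chars.isdigit d = true)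
    (h : PySem.Chars.upperChar c = d) : c = d := by
  unfold PySem.Chars.upperChar at h
  split at h
  · rename_i hl
    exfalso
    simp only [PySem.Chars.islower, Bool.and_eq_true, decide_eq_true_eq] at hl
    simp only [PySem.Chars.isdigit, Bool.and_eq_true, decide_eq_true_eq] at hd
    have h97 : 97 ≤ c.toNat := hl.1
    have h122 : c.toNat ≤ 122 := hl.2
    have hd48 : 48 ≤ d.toNat := hd.1
    have hd57 : d.toNat ≤ 57 := hd.2
    have hv : (Char.ofNat (c.toNat - 32)).toNat = c.toNat - 32 := by
      rw [Char.toNat_ofNat, if_pos]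
      exact Or.inl (by omega)
    have h2 := congrArg Char.toNat h
    rw [hv] at h2
    omega
  · exact h

-- A's startswith test, characterised positionally
lemma pvMatch_iff (t p : List Char) :
    PySem.Chars.startswith (PySem.Chars.upper t) (p ++ [' ']) = true ↔ pvMatchP t p := by
  constructor
  · intro h
    rw [PySem.Chars.startswith_iff] at h
    obtain ⟨r, hr⟩ := h
    unfold PySem.Chars.upper at hr
    constructor
    · unfold PySem.Chars.upper
      rw [List.map_take, ← hr, List.append_assoc, List.take_left]
    · have hmapn : (t.map PySem.Chars.upperChar)[p.length]? = some ' ' := by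
        rw [← hr, List.append_assoc, List.getElem?_append_right (le_refl _)]
        simp
      rw [List.getElem?_map] at hmapn
      cases ht : t[p.length]? with
      | none => rw [ht] at hmapn; simp at hmapn
      | some c =>
        rw [ht] at hmapn
        simp only [Option.map_some, Option.some.injEq] at hmapn
        rw [(pvUpperChar_eq_space_iff c).mp hmapn]
  · rintro ⟨hup, hn⟩
    have hlen : p.length < t.length := by
      by_contra hh
      rw [List.getElem?_eq_none (by omega)] at hn
      simp at hn
    rw [PySem.Chars.startswith_iff]
    refine ⟨PySem.Chars.upper (t.drop (p.length + 1)), ?_⟩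
    have hsplit : t = t.take p.length ++ t[p.length] :: t.drop (p.length + 1) := by
      conv_lhs => rw [← List.take_append_drop p.length t]
      rw [List.drop_eq_getElem_cons hlen]
    have hc : t[p.length] = ' ' := by
      have := List.getElem?_eq_getElem hlen
      rw [hn] at this
      exact (Option.some.injEq _ _).mp this.symm
    conv_rhs => rw [hsplit]
    unfold PySem.Chars.upper at hup ⊢
    rw [List.map_append, List.map_cons, hup, hc]
    simp [List.append_assoc]
    rfl

-- the scan's result: at least i, digits throughout [i, scan), non-digit (or end) at scan
lemma pvScan_spec (t : List Char) (i : Nat) :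
    i ≤ pvScanDigits t i ∧
    (∀ j, i ≤ j → j < pvScanDigits t i → ∃ c, t[j]? = some c ∧ PySem.Chars.isdigit c = true) ∧
    (∀ c, t[pvScanDigits t i]? = some c → PySem.Chars.isdigit c = false) := by
  induction hn : t.length - i using Nat.strong_induction_on generalizing i with
  | _ n ih =>
    unfold pvScanDigits
    by_cases h : i < t.length
    · rw [dif_pos h]
      by_cases hd : PySem.Chars.isdigit (t[i]'h) = true
      · rw [if_pos hd]
        obtain ⟨h1, h2, h3⟩ := ih (t.length - (i + 1)) (by omega) (i + 1) rfl
        refine ⟨by omega, ?_, h3⟩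
        intro j hij hj
        rcases eq_or_lt_of_le hij with heq | hlt
        · subst heq
          exact ⟨t[i]'h, List.getElem?_eq_getElem h, hd⟩
        · exact h2 j hlt hj
      · rw [if_neg hd]
        refine ⟨le_refl _, fun j hij hj => absurd hj (by omega), fun c hc => ?_⟩
        rw [List.getElem?_eq_getElem h] at hc
        rw [← (Option.some.injEq _ _).mp hc]
        simpa using hd
    · rw [dif_neg h]
      refine ⟨le_refl _, fun j hij hj => absurd hj (by omega), fun c hc => ?_⟩
      rw [List.getElem?_eq_none (by omega)] at hc
      simp at hc

-- the scan is determined by a digit run bounded by a non-digit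
lemma pvScan_eq (t : List Char) (m : Nat)
    (hstop : ∀ c, t[m]? = some c → PySem.Chars.isdigit c = false) :
    ∀ i, i ≤ m → (∀ j, i ≤ j → j < m → ∃ c, t[j]? = some c ∧ PySem.Chars.isdigit c = true) →
    pvScanDigits t i = m := by
  intro i
  induction hn : m - i using Nat.strong_induction_on generalizing i with
  | _ n ih =>
    intro him hrun
    unfold pvScanDigits
    by_cases h : i < m
    · obtain ⟨c, hc, hcd⟩ := hrun i (le_refl _) h
      have hil : i < t.length := by
        by_contra hh
        rw [List.getElem?_eq_none (by omega)] at hc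
        simp at hc
      rw [dif_pos hil]
      have hti : t[i]'hil = c := by
        have := List.getElem?_eq_getElem hil
        rw [hc] at this
        exact (Option.some.injEq _ _).mp this.symm
      rw [if_pos (by rw [hti]; exact hcd)]
      exact ih (m - (i + 1)) (by omega) (i + 1) rfl (by omega)
        (fun j hj hjm => hrun j (by omega) hjm)
    · have him' : i = m := by omega
      subst him'
      by_cases hil : i < t.length
      · rw [dif_pos hil]
        rw [if_neg ?stopcase]
        case stopcase =>
          rw [hstop (t[i]'hil) (List.getElem?_eq_getElem hil)]
          exact Bool.false_ne_true
      · rw [dif_neg hil]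

-- the dict holds exactly the keys "W" and "M"
lemma pvGetNumbers_cases (L : Char) (ns : List (List Char))
    (h : pvTierNumbers.get? [L] = some ns) :
    (L = 'W' ∧ ns = [['1','0','0'], ['7','5'], ['5','0'], ['3','5'], ['1','5']]) ∨
    (L = 'M' ∧ ns = [['2','5'], ['1','5']]) := by
  by_cases hW : L = 'W'
  · subst hW
    left
    refine ⟨rfl, ?_⟩
    have h2 : pvTierNumbers.get? ['W']
        = some [['1','0','0'], ['7','5'], ['5','0'], ['3','5'], ['1','5']] := by decide
    rw [h2] at h
    exact ((Option.some.injEq _ _).mp h).symm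
  · by_cases hM : L = 'M'
    · subst hM
      right
      refine ⟨rfl, ?_⟩
      have h2 : pvTierNumbers.get? ['M'] = some [['2','5'], ['1','5']] := by decide
      rw [h2] at h
      exact ((Option.some.injEq _ _).mp h).symm
    · exfalso
      have hW' : ('W' == L) = false := by simp [Ne.symm hW]
      have hM' : ('M' == L) = false := by simp [Ne.symm hM]
      have h2 : pvTierNumbers.get? [L] = none := by
        simp [pvTierNumbers, PySem.Dict.get?, List.find?, hW', hM']
      rw [h2] at h
      simp at h

-- the loop returns ("", t) when nothing matches
lemma pvLoopA_none (t : List Char) (l : List (List Char))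
    (h : ∀ q ∈ l, PySem.Chars.startswith (PySem.Chars.upper t) (q ++ [' ']) = false) :
    pvLoopA t l = ([], t) := by
  induction l with
  | nil => rfl
  | cons q l ih =>
    unfold pvLoopA
    rw [if_neg (by simp [h q List.mem_cons_self])]
    exact ih fun r hr => h r (List.mem_cons_of_mem _ hr)

-- the loop returns p's branch when p matches and is the only match in l
lemma pvLoopA_hit (t : List Char) (l : List (List Char)) (p : List Char) (hmem : p ∈ l)
    (hm : PySem.Chars.startswith (PySem.Chars.upper t) (p ++ [' ']) = true)
    (huniq : ∀ q ∈ l, PySem.Chars.startswith (PySem.Chars.upper t) (q ++ [' ']) = true → q = p) :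
    pvLoopA t l = (PySem.Chars.upper p,
      PySem.Chars.strip (PySem.Chars.slice t (some (p.length : Int)) none)) := by
  induction l with
  | nil => exact absurd hmem List.not_mem_nil
  | cons q l ih =>
    unfold pvLoopA
    by_cases hq : PySem.Chars.startswith (PySem.Chars.upper t) (q ++ [' ']) = true
    · have hqp := huniq q List.mem_cons_self hq
      subst hqp
      rw [if_pos hq]
    · rw [if_neg hq]
      refine ih ?_ fun r hr hrt => huniq r (List.mem_cons_of_mem _ hr) hrt
      rcases List.mem_cons.mp hmem with rfl | h
      · exact absurd hm hq
      · exact h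

-- stripping eats a leading space
lemma pvStrip_cons_space (x : List Char) :
    PySem.Chars.strip (' ' :: x) = PySem.Chars.strip x := by
  simp [PySem.Chars.strip, PySem.Chars.lstrip,
    show PySem.Chars.isspace ' ' = true from rfl]

-- B's lexer conditions produce a matching prefix (and pin down the slice)
lemma pvDir1 (c : Char) (ts : List Char) (ns : List (List Char))
    (hget : pvTierNumbers.get? [PySem.Chars.upperChar c] = some ns)
    (hi : pvScanDigits (c :: ts) 1 < (c :: ts).length)
    (hsp : (c :: ts)[pvScanDigits (c :: ts) 1]? = some ' ')
    (hr : ts.take (pvScanDigits (c :: ts) 1 - 1) ∈ ns) :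
    (PySem.Chars.upperChar c :: ts.take (pvScanDigits (c :: ts) 1 - 1)) ∈ pvTierPrefixes ∧
    pvMatchP (c :: ts) (PySem.Chars.upperChar c :: ts.take (pvScanDigits (c :: ts) 1 - 1)) ∧
    (PySem.Chars.upperChar c :: ts.take (pvScanDigits (c :: ts) 1 - 1)).length
      = pvScanDigits (c :: ts) 1 ∧
    PySem.Chars.upper (PySem.Chars.upperChar c :: ts.take (pvScanDigits (c :: ts) 1 - 1))
      = PySem.Chars.upperChar c :: ts.take (pvScanDigits (c :: ts) 1 - 1) := by
  obtain ⟨h1le, hdig, -⟩ := pvScan_spec (c :: ts) 1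
  set i := pvScanDigits (c :: ts) 1 with hidef
  have hits : i ≤ ts.length := by
    simpa using Nat.lt_succ_iff.mp (by simpa using hi)
  have hlen : (ts.take (i - 1)).length = i - 1 := by
    rw [List.length_take]
    omega
  -- the run positions are literal digits of ts, so upperChar fixes them
  have hupr : (ts.take (i - 1)).map PySem.Chars.upperChar = ts.take (i - 1) := by
    conv_rhs => rw [← List.map_id (List.take (i - 1) ts)]
    apply List.map_congr_left
    intro x hx
    obtain ⟨k, hk, hxk⟩ := List.getElem_of_mem hx
    rw [List.getElem_take] at hxk
    have hkts : k < ts.length := by omega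
    obtain ⟨d, hd, hdd⟩ := hdig (k + 1) (by omega) (by rw [List.length_take] at hk; omega)
    rw [List.getElem?_cons_succ, List.getElem?_eq_getElem hkts] at hd
    have hxd : x = d := by
      rw [← hxk]
      exact (Option.some.injEq _ _).mp hd
    subst hxd
    show PySem.Chars.upperChar x = x
    unfold PySem.Chars.upperChar
    rw [if_neg]
    simp only [PySem.Chars.islower, Bool.and_eq_true, decide_eq_true_eq, not_and]
    simp only [PySem.Chars.isdigit, Bool.and_eq_true, decide_eq_true_eq] at hdd
    intro h1
    have h97 : 97 ≤ x.toNat := h1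
    have h57 : x.toNat ≤ 57 := hdd.2
    exact absurd h97 (by omega)
  have hmatch : pvMatchP (c :: ts) (PySem.Chars.upperChar c :: ts.take (i - 1)) := by
    constructor
    · simp only [List.length_cons, hlen]
      rw [show i - 1 + 1 = i by omega, show i = (i - 1) + 1 by omega, List.take_succ_cons]
      unfold PySem.Chars.upper
      rw [List.map_cons, hupr, show i - 1 + 1 - 1 = i - 1 by omega]
    · simp only [List.length_cons, hlen]
      rw [show i - 1 + 1 = i by omega]
      exact hsp
  refine ⟨?_, hmatch, by simp only [List.length_cons, hlen]; omega, ?_⟩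
  · -- membership in the prefix tuple, by cases on the letter and the stored runs
    rcases pvGetNumbers_cases _ _ hget with ⟨hL, hns⟩ | ⟨hL, hns⟩ <;> subst hns
    · simp only [List.mem_cons, List.not_mem_nil, or_false] at hr
      rcases hr with hr | hr | hr | hr | hr <;> rw [hL, hr] <;> decide
    · simp only [List.mem_cons, List.not_mem_nil, or_false] at hr
      rcases hr with hr | hr <;> rw [hL, hr] <;> decide
  · show PySem.Chars.upper _ = _
    unfold PySem.Chars.upper
    rw [List.map_cons, hupr]
    congr 1
    rcases pvGetNumbers_cases _ _ hget with ⟨hL, -⟩ | ⟨hL, -⟩ <;> rw [hL] <;> decide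

-- a digit-image equation forces equality of the source characters
lemma pvMap_upper_digits (xs ds : List Char) (hds : ∀ d ∈ ds, PySem.Chars.isdigit d = true)
    (h : xs.map PySem.Chars.upperChar = ds) : xs = ds := by
  induction xs generalizing ds with
  | nil => simpa using h
  | cons x xs ih =>
    cases ds with
    | nil => simp at h
    | cons d ds' =>
      simp only [List.map_cons, List.cons.injEq] at h
      rw [pvUpperChar_eq_digit x d (hds d List.mem_cons_self) h.1,
        ih ds' (fun e he => hds e (List.mem_cons_of_mem _ he)) h.2]

-- one concrete prefix L :: ds forces B's lexer conditions
lemma pvDir2_case (c : Char) (ts : List Char) (L : Char) (ds : List Char)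
    (ns : List (List Char)) (hdig : ∀ d ∈ ds, PySem.Chars.isdigit d = true)
    (hget : pvTierNumbers.get? [L] = some ns) (hmem : ds ∈ ns)
    (hm : pvMatchP (c :: ts) (L :: ds)) :
    ∃ ns', pvTierNumbers.get? [PySem.Chars.upperChar c] = some ns' ∧
      pvScanDigits (c :: ts) 1 = (L :: ds).length ∧
      (L :: ds).length < (c :: ts).length ∧
      ts.take ((L :: ds).length - 1) ∈ ns' ∧
      PySem.Chars.upperChar c :: ts.take ((L :: ds).length - 1) = L :: ds := by
  obtain ⟨hup, hsp⟩ := hm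
  have hlt : (L :: ds).length < (c :: ts).length := by
    by_contra hh
    rw [List.getElem?_eq_none (by omega)] at hsp
    simp at hsp
  have hdts : ds.length < ts.length := by simpa using hlt
  -- split the uppercasing of the taken head
  rw [show (L :: ds).length = ds.length + 1 from by simp] at hup
  rw [List.take_succ_cons] at hup
  unfold PySem.Chars.upper at hup
  rw [List.map_cons] at hup
  simp only [List.cons.injEq] at hup
  have hLc : PySem.Chars.upperChar c = L := hup.1
  have htake : ts.take ds.length = ds := pvMap_upper_digits _ _ hdig hup.2
  have hlen1 : (L :: ds).length - 1 = ds.length := by simp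
  refine ⟨ns, by rw [hLc]; exact hget, ?_, hlt, by rw [hlen1, htake]; exact hmem,
    by rw [hlen1, htake, hLc]⟩
  -- the digit scan stops exactly at the space after the run
  apply pvScan_eq
  · intro c' hc'
    simp only [List.length_cons] at hc' hsp
    rw [hsp] at hc'
    rw [← (Option.some.injEq _ _).mp hc']
    decide
  · simp
  · intro j h1j hjlen
    obtain ⟨k, rfl⟩ : ∃ k, j = k + 1 := ⟨j - 1, by omega⟩
    have hk : k < ds.length := by simp at hjlen; omega
    refine ⟨ds[k]'hk, ?_, hdig _ (List.getElem_mem hk)⟩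
    rw [List.getElem?_cons_succ, ← List.getElem?_take_of_lt (l := ts) hk, htake,
      List.getElem?_eq_getElem hk]

-- a matching prefix forces B's lexer conditions
lemma pvDir2 (c : Char) (ts : List Char) (q : List Char) (hq : q ∈ pvTierPrefixes)
    (hm : pvMatchP (c :: ts) q) :
    ∃ ns, pvTierNumbers.get? [PySem.Chars.upperChar c] = some ns ∧
      pvScanDigits (c :: ts) 1 = q.length ∧
      q.length < (c :: ts).length ∧
      ts.take (q.length - 1) ∈ ns ∧
      PySem.Chars.upperChar c :: ts.take (q.length - 1) = q := by
  simp only [pvTierPrefixes, List.mem_cons, List.not_mem_nil, or_false] at hq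
  rcases hq with rfl | rfl | rfl | rfl | rfl | rfl | rfl
  · exact pvDir2_case c ts 'W' ['1','0','0'] [['1','0','0'], ['7','5'], ['5','0'], ['3','5'], ['1','5']] (by intro d hd; fin_cases hd <;> decide) (by decide) (by decide) hm
  · exact pvDir2_case c ts 'W' ['7','5'] [['1','0','0'], ['7','5'], ['5','0'], ['3','5'], ['1','5']] (by intro d hd; fin_cases hd <;> decide) (by decide) (by decide) hm
  · exact pvDir2_case c ts 'W' ['5','0'] [['1','0','0'], ['7','5'], ['5','0'], ['3','5'], ['1','5']] (by intro d hd; fin_cases hd <;> decide) (by decide) (by decide) hm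
  · exact pvDir2_case c ts 'W' ['3','5'] [['1','0','0'], ['7','5'], ['5','0'], ['3','5'], ['1','5']] (by intro d hd; fin_cases hd <;> decide) (by decide) (by decide) hm
  · exact pvDir2_case c ts 'W' ['1','5'] [['1','0','0'], ['7','5'], ['5','0'], ['3','5'], ['1','5']] (by intro d hd; fin_cases hd <;> decide) (by decide) (by decide) hm
  · exact pvDir2_case c ts 'M' ['2','5'] [['2','5'], ['1','5']] (by intro d hd; fin_cases hd <;> decide) (by decide) (by decide) hm
  · exact pvDir2_case c ts 'M' ['1','5'] [['2','5'], ['1','5']] (by intro d hd; fin_cases hd <;> decide) (by decide) (by decide) hm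

-- the structural core: A's prefix loop equals B's lexer
lemma pvCore (t : List Char) : pvLoopA t pvTierPrefixes = pvMatchTier t := by
  unfold pvMatchTier
  by_cases ht : t ≠ []
  · obtain ⟨c, ts, rfl⟩ := List.exists_cons_of_ne_nil ht
    rw [if_pos ht]
    have hlet : PySem.Chars.upper [(c :: ts).headD ' '] = [PySem.Chars.upperChar c] := rfl
    rw [hlet]
    dsimp only
    cases hget : pvTierNumbers.get? [PySem.Chars.upperChar c] with
    | none =>
      apply pvLoopA_none
      intro q hq
      by_contra hcon
      rw [Bool.not_eq_false] at hcon
      obtain ⟨ns', hns', -⟩ := pvDir2 c ts q hq ((pvMatch_iff _ _).mp hcon)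
      rw [hget] at hns'
      simp at hns'
    | some ns =>
      show pvLoopA (c :: ts) pvTierPrefixes = _
      dsimp only
      set i := pvScanDigits (c :: ts) 1 with hidef
      have hslice : PySem.Chars.slice (c :: ts) (some 1) (some (i : Int)) = ts.take (i - 1) := by
        rw [PySem.Chars.slice_eq_listSlice,
          PySem.List.slice_toNat _ (by norm_num) (Int.natCast_nonneg i)]
        simp
      by_cases hcond : i < (c :: ts).length ∧ (c :: ts)[i]? = some ' ' ∧
          PySem.Chars.slice (c :: ts) (some 1) (some (i : Int)) ∈ ns
      · rw [if_pos hcond]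
        obtain ⟨hmem, hM, hlen, hupp⟩ :=
          pvDir1 c ts ns hget hcond.1 hcond.2.1 (by rw [← hslice]; exact hcond.2.2)
        rw [pvLoopA_hit (c :: ts) _ _ hmem ((pvMatch_iff _ _).mpr hM) ?uniq]
        case uniq =>
          intro q hq hqt
          obtain ⟨ns', -, hscan, -, -, hqeq⟩ := pvDir2 c ts q hq ((pvMatch_iff _ _).mp hqt)
          rw [← hqeq, ← hscan, ← hidef]
        refine Prod.ext ?_ ?_
        · show PySem.Chars.upper _ = _
          rw [hupp, hslice]
          rfl
        · show PySem.Chars.strip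
              (PySem.Chars.slice (c :: ts) (some ((_ : List Char).length : Int)) none) = _
          rw [hlen]
          have hfrom1 : PySem.Chars.slice (c :: ts) (some (i : Int)) none = (c :: ts).drop i := by
            rw [PySem.Chars.slice_eq_listSlice, PySem.List.slice_from _ (Int.natCast_nonneg i)]
            simp
          have hfrom2 : PySem.Chars.slice (c :: ts) (some ((i : Int) + 1)) none
              = (c :: ts).drop (i + 1) := by
            rw [show ((i : Int) + 1) = ((i + 1 : Nat) : Int) by push_cast; ring]
            rw [PySem.Chars.slice_eq_listSlice, PySem.List.slice_from _ (Int.natCast_nonneg _)]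
            simp
          rw [hfrom1, hfrom2, List.drop_eq_getElem_cons hcond.1]
          have hsp : (c :: ts)[i]'hcond.1 = ' ' := by
            have h0 := List.getElem?_eq_getElem hcond.1
            exact (Option.some.injEq _ _).mp (h0.symm.trans hcond.2.1)
          rw [hsp, pvStrip_cons_space]
      · rw [if_neg hcond]
        apply pvLoopA_none
        intro q hq
        by_contra hcon
        rw [Bool.not_eq_false] at hcon
        have hm := (pvMatch_iff _ _).mp hcon
        obtain ⟨ns', hns', hscan, hlt, hmemtake, -⟩ := pvDir2 c ts q hq hm
        rw [hget] at hns'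
        have hns : ns' = ns := ((Option.some.injEq _ _).mp hns').symm
        subst hns
        refine hcond ⟨?_, ?_, ?_⟩
        · rw [hidef, hscan]; exact hlt
        · rw [hidef, hscan]; exact hm.2
        · rw [hslice, hidef, hscan]; exact hmemtake
  · rw [if_neg ht]
    rw [not_ne_iff] at ht
    subst ht
    decide

-- ===== VERDICT (by name: the statement is the Claim_ definition above) =====
theorem parse_tournament_name_py_spec : Claim_equal_parse_tournament_name_py := by
  intro text _
  unfold Spec_parse_tournament_name_py parse_tournament_name_py parse_tournament_name_py_alt
  dsimp only
  rw [pvCore (PySem.Chars.strip text.toList)]
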